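-- pv_equiv track=rewrite | github.com/STOSKR/Master-IA-ARA | src/cs2_trend/phase0/discovery.py | _infer_weapon_family
-- ===== SOURCE A (Python) =====
-- def _infer_weapon_family(weapon_name: str | None) -> str:
--     if weapon_name is None:
--         return "unknown"
--
--     candidate = weapon_name.lower()
--     if candidate.startswith("★") or "knife" in candidate or "bayonet" in candidate:
--         return "knife"
--     if any(marker in candidate for marker in ("gloves", "hand wraps", "bloodhound")):
--         return "gloves"
--     if candidate in {
--         "ak-47",
--         "m4a4",
--         "m4a1-s",
--         "famas",
--         "galil ar",
--         "sg 553",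
--         "aug",
--     }:
--         return "rifle"
--     if candidate in {"awp", "ssg 08", "scar-20", "g3sg1"}:
--         return "sniper_rifle"
--     if candidate in {"mac-10", "mp9", "mp7", "mp5-sd", "ump-45", "p90", "pp-bizon"}:
--         return "smg"
--     if candidate in {
--         "glock-18",
--         "usp-s",
--         "p2000",
--         "p250",
--         "desert eagle",
--         "dual berettas",
--         "five-seven",
--         "cz75-auto",
--         "r8 revolver",
--         "tec-9",
--     }:
--         return "pistol"
--     if candidate in {"nova", "xm1014", "mag-7", "sawed-off"}:
--         return "shotgun"
--     if candidate in {"m249", "negev"}: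
--         return "machinegun"
--     return "other_weapon"
-- ===== SOURCE B (Python) =====
-- # One uniform rule table scanned first-match-wins: each rule is (kind, pattern, family),
-- # kind in {"prefix", "contains", "exact"}; rule order mirrors A's branch order.
-- _RULES = (
--     ("prefix", "\u2605", "knife"),
--     ("contains", "knife", "knife"),
--     ("contains", "bayonet", "knife"),
--     ("contains", "gloves", "gloves"),
--     ("contains", "hand wraps", "gloves"),
--     ("contains", "bloodhound", "gloves"),
--     ("exact", "ak-47", "rifle"),
--     ("exact", "m4a4", "rifle"),
--     ("exact", "m4a1-s", "rifle"),
--     ("exact", "famas", "rifle"),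
--     ("exact", "galil ar", "rifle"),
--     ("exact", "sg 553", "rifle"),
--     ("exact", "aug", "rifle"),
--     ("exact", "awp", "sniper_rifle"),
--     ("exact", "ssg 08", "sniper_rifle"),
--     ("exact", "scar-20", "sniper_rifle"),
--     ("exact", "g3sg1", "sniper_rifle"),
--     ("exact", "mac-10", "smg"),
--     ("exact", "mp9", "smg"),
--     ("exact", "mp7", "smg"),
--     ("exact", "mp5-sd", "smg"),
--     ("exact", "ump-45", "smg"),
--     ("exact", "p90", "smg"),
--     ("exact", "pp-bizon", "smg"),
--     ("exact", "glock-18", "pistol"),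
--     ("exact", "usp-s", "pistol"),
--     ("exact", "p2000", "pistol"),
--     ("exact", "p250", "pistol"),
--     ("exact", "desert eagle", "pistol"),
--     ("exact", "dual berettas", "pistol"),
--     ("exact", "five-seven", "pistol"),
--     ("exact", "cz75-auto", "pistol"),
--     ("exact", "r8 revolver", "pistol"),
--     ("exact", "tec-9", "pistol"),
--     ("exact", "nova", "shotgun"),
--     ("exact", "xm1014", "shotgun"),
--     ("exact", "mag-7", "shotgun"),
--     ("exact", "sawed-off", "shotgun"),
--     ("exact", "m249", "machinegun"),
--     ("exact", "negev", "machinegun"),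
-- )
--
--
-- def _rule_matches(kind, pattern, candidate):
--     if kind == "prefix":
--         return candidate.startswith(pattern)
--     if kind == "contains":
--         return pattern in candidate
--     return candidate == pattern
--
--
-- def _infer_weapon_family(weapon_name):
--     if weapon_name is None:
--         return "unknown"
--     candidate = weapon_name.lower()
--     for kind, pattern, family in _RULES:
--         if _rule_matches(kind, pattern, candidate):
--             return family
--     return "other_weapon"
-- ===== Notes on version B (the rewrite author's own statement) =====
-- stated objective: alternative
-- what changed: The hand-written if-chain mixing prefix, substring and set-membership tests is replaced by a single first-match scan over one flat ordered rule table of (kind, pattern, family) entries interpreted by a generic matcher.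
import Mathlib
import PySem

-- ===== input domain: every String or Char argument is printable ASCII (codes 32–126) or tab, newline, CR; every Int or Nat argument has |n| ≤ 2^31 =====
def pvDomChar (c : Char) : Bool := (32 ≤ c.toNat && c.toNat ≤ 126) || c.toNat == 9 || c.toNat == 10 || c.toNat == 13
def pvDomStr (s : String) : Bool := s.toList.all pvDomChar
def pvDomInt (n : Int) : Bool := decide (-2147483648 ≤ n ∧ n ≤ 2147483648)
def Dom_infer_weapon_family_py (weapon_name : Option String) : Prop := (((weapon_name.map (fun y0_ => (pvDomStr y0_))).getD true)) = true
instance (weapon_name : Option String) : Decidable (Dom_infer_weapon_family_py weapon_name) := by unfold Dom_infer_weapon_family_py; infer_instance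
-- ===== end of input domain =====

-- B replaces A's hand-written branch chain by a first-match scan over one flat ordered rule table
-- (kind, pattern, family) interpreted by a generic matcher; same observable behaviour (alternative).

-- ===== PORT A =====
def infer_weapon_family_py (weapon_name : Option String) : String :=
  match weapon_name with
  | none => "unknown"
  | some w =>
    let candidate := PySem.Str.lower w
    if PySem.Str.startswith candidate "★" || PySem.Str.isIn "knife" candidate || PySem.Str.isIn "bayonet" candidate then "knife"
    else if (["gloves", "hand wraps", "bloodhound"].any (fun marker => PySem.Str.isIn marker candidate)) then "gloves"
    else if (["ak-47", "m4a4", "m4a1-s", "famas", "galil ar", "sg 553", "aug"].contains candidate) then "rifle"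
    else if (["awp", "ssg 08", "scar-20", "g3sg1"].contains candidate) then "sniper_rifle"
    else if (["mac-10", "mp9", "mp7", "mp5-sd", "ump-45", "p90", "pp-bizon"].contains candidate) then "smg"
    else if (["glock-18", "usp-s", "p2000", "p250", "desert eagle", "dual berettas", "five-seven", "cz75-auto", "r8 revolver", "tec-9"].contains candidate) then "pistol"
    else if (["nova", "xm1014", "mag-7", "sawed-off"].contains candidate) then "shotgun"
    else if (["m249", "negev"].contains candidate) then "machinegun"
    else "other_weapon"

-- ===== PORT B =====
-- B's flat rule table, in Source B's order.
def pvRules : List (String × String × String) :=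
  [("prefix", "★", "knife"),
   ("contains", "knife", "knife"),
   ("contains", "bayonet", "knife"),
   ("contains", "gloves", "gloves"),
   ("contains", "hand wraps", "gloves"),
   ("contains", "bloodhound", "gloves"),
   ("exact", "ak-47", "rifle"),
   ("exact", "m4a4", "rifle"),
   ("exact", "m4a1-s", "rifle"),
   ("exact", "famas", "rifle"),
   ("exact", "galil ar", "rifle"),
   ("exact", "sg 553", "rifle"),
   ("exact", "aug", "rifle"),
   ("exact", "awp", "sniper_rifle"),
   ("exact", "ssg 08", "sniper_rifle"),
   ("exact", "scar-20", "sniper_rifle"),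
   ("exact", "g3sg1", "sniper_rifle"),
   ("exact", "mac-10", "smg"),
   ("exact", "mp9", "smg"),
   ("exact", "mp7", "smg"),
   ("exact", "mp5-sd", "smg"),
   ("exact", "ump-45", "smg"),
   ("exact", "p90", "smg"),
   ("exact", "pp-bizon", "smg"),
   ("exact", "glock-18", "pistol"),
   ("exact", "usp-s", "pistol"),
   ("exact", "p2000", "pistol"),
   ("exact", "p250", "pistol"),
   ("exact", "desert eagle", "pistol"),
   ("exact", "dual berettas", "pistol"),
   ("exact", "five-seven", "pistol"),
   ("exact", "cz75-auto", "pistol"),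
   ("exact", "r8 revolver", "pistol"),
   ("exact", "tec-9", "pistol"),
   ("exact", "nova", "shotgun"),
   ("exact", "xm1014", "shotgun"),
   ("exact", "mag-7", "shotgun"),
   ("exact", "sawed-off", "shotgun"),
   ("exact", "m249", "machinegun"),
   ("exact", "negev", "machinegun")]

-- Source B's _rule_matches
def pvRuleMatches (kind pattern candidate : String) : Bool :=
  if kind == "prefix" then PySem.Str.startswith candidate pattern
  else if kind == "contains" then PySem.Str.isIn pattern candidate
  else candidate == pattern

-- Source B's for-loop with early return: first matching rule wins
def pvScan (rules : List (String × String × String)) (candidate : String) : String :=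
  match rules with
  | [] => "other_weapon"
  | (kind, pattern, family) :: rest =>
    if pvRuleMatches kind pattern candidate then family else pvScan rest candidate

def infer_weapon_family_py_alt (weapon_name : Option String) : String :=
  match weapon_name with
  | none => "unknown"
  | some w => pvScan pvRules (PySem.Str.lower w)

-- ===== PRECONDITION & SPEC =====
def Spec_infer_weapon_family_py (weapon_name : Option String) (out : String) : Prop := out = infer_weapon_family_py_alt weapon_name
instance (weapon_name : Option String) (out : String) : Decidable (Spec_infer_weapon_family_py weapon_name out) := by unfold Spec_infer_weapon_family_py; infer_instance

-- ===== CLAIM (what is proved, stated in full; the proofs are below) =====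
def Claim_equal_infer_weapon_family_py : Prop := ∀ (weapon_name : Option String), Dom_infer_weapon_family_py weapon_name → Spec_infer_weapon_family_py weapon_name (infer_weapon_family_py weapon_name)

-- ===== LEMMAS AND PROOFS =====

-- A's branch chain equals B's rule-table scan on every candidate string.
set_option maxRecDepth 16384 in
theorem chain_eq_scan (c : String) :
    (if PySem.Str.startswith c "★" || PySem.Str.isIn "knife" c || PySem.Str.isIn "bayonet" c then "knife"
     else if (["gloves", "hand wraps", "bloodhound"].any (fun marker => PySem.Str.isIn marker c)) then "gloves"
     else if (["ak-47", "m4a4", "m4a1-s", "famas", "galil ar", "sg 553", "aug"].contains c) then "rifle"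
     else if (["awp", "ssg 08", "scar-20", "g3sg1"].contains c) then "sniper_rifle"
     else if (["mac-10", "mp9", "mp7", "mp5-sd", "ump-45", "p90", "pp-bizon"].contains c) then "smg"
     else if (["glock-18", "usp-s", "p2000", "p250", "desert eagle", "dual berettas", "five-seven", "cz75-auto", "r8 revolver", "tec-9"].contains c) then "pistol"
     else if (["nova", "xm1014", "mag-7", "sawed-off"].contains c) then "shotgun"
     else if (["m249", "negev"].contains c) then "machinegun"
     else "other_weapon") = pvScan pvRules c := by
  simp only [pvRules, pvScan, pvRuleMatches, List.any_cons, List.any_nil,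
    List.contains_eq_mem, List.mem_cons, List.not_mem_nil, or_false]
  by_cases hp : PySem.Chars.startswith c.toList ['★'] = true
  · simp [hp]
  by_cases hk : PySem.Chars.isIn ['k','n','i','f','e'] c.toList = true
  · simp [hp, hk]
  by_cases hb : PySem.Chars.isIn ['b','a','y','o','n','e','t'] c.toList = true
  · simp [hp, hk, hb]
  by_cases hg : PySem.Chars.isIn ['g','l','o','v','e','s'] c.toList = true
  · simp [hp, hk, hb, hg]
  by_cases hw : PySem.Chars.isIn ['h','a','n','d',' ','w','r','a','p','s'] c.toList = true
  · simp [hp, hk, hb, hg, hw]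
  by_cases hh : PySem.Chars.isIn ['b','l','o','o','d','h','o','u','n','d'] c.toList = true
  · simp [hp, hk, hb, hg, hw, hh]
  simp [hp, hk, hb, hg, hw, hh]
  by_cases h0 : c = "ak-47"
  · subst h0; decide
  by_cases h1 : c = "m4a4"
  · subst h1; decide
  by_cases h2 : c = "m4a1-s"
  · subst h2; decide
  by_cases h3 : c = "famas"
  · subst h3; decide
  by_cases h4 : c = "galil ar"
  · subst h4; decide
  by_cases h5 : c = "sg 553"
  · subst h5; decide
  by_cases h6 : c = "aug"
  · subst h6; decide
  by_cases h7 : c = "awp"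
  · subst h7; decide
  by_cases h8 : c = "ssg 08"
  · subst h8; decide
  by_cases h9 : c = "scar-20"
  · subst h9; decide
  by_cases h10 : c = "g3sg1"
  · subst h10; decide
  by_cases h11 : c = "mac-10"
  · subst h11; decide
  by_cases h12 : c = "mp9"
  · subst h12; decide
  by_cases h13 : c = "mp7"
  · subst h13; decide
  by_cases h14 : c = "mp5-sd"
  · subst h14; decide
  by_cases h15 : c = "ump-45"
  · subst h15; decide
  by_cases h16 : c = "p90"
  · subst h16; decide
  by_cases h17 : c = "pp-bizon"
  · subst h17; decide
  by_cases h18 : c = "glock-18"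
  · subst h18; decide
  by_cases h19 : c = "usp-s"
  · subst h19; decide
  by_cases h20 : c = "p2000"
  · subst h20; decide
  by_cases h21 : c = "p250"
  · subst h21; decide
  by_cases h22 : c = "desert eagle"
  · subst h22; decide
  by_cases h23 : c = "dual berettas"
  · subst h23; decide
  by_cases h24 : c = "five-seven"
  · subst h24; decide
  by_cases h25 : c = "cz75-auto"
  · subst h25; decide
  by_cases h26 : c = "r8 revolver"
  · subst h26; decide
  by_cases h27 : c = "tec-9"
  · subst h27; decide
  by_cases h28 : c = "nova"
  · subst h28; decide
  by_cases h29 : c = "xm1014"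
  · subst h29; decide
  by_cases h30 : c = "mag-7"
  · subst h30; decide
  by_cases h31 : c = "sawed-off"
  · subst h31; decide
  by_cases h32 : c = "m249"
  · subst h32; decide
  by_cases h33 : c = "negev"
  · subst h33; decide
  simp [h0, h1, h2, h3, h4, h5, h6, h7, h8, h9, h10, h11, h12, h13, h14, h15, h16, h17, h18, h19, h20, h21, h22, h23, h24, h25, h26, h27, h28, h29, h30, h31, h32, h33]

-- ===== VERDICT (by name: the statement is the Claim_ definition above) =====
theorem infer_weapon_family_py_spec : Claim_equal_infer_weapon_family_py := by
  intro weapon_name _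
  unfold Spec_infer_weapon_family_py
  cases weapon_name with
  | none => rfl
  | some w =>
    simp only [infer_weapon_family_py, infer_weapon_family_py_alt]
    exact chain_eq_scan (PySem.Str.lower w)
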